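-- pv_equiv track=rewrite | github.com/tarekbadrsh/codewars | 6-kyu/27-Encrypt-this/python/main.py | encrypt_this
-- ===== SOURCE A (Python) =====
-- def encrypt_this(text):
--
-- 	words = text.split()
-- 	result = []
-- 	for w in words:
-- 		nw = ""
-- 		i = 0
-- 		for letter in w:
-- 			if i == 0:
-- 				nw += str(ord(letter))
-- 			elif i == 1 :
-- 				nw += w[len(w)-1]
-- 			elif i == (len(w) - 1):
-- 				nw += w[1]
-- 			else:
-- 				nw += w[i]
-- 			i += 1
-- 		result.append(nw)
-- 	return " ".join(result)
-- ===== SOURCE B (Python) =====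
-- def encrypt_this(text):
--     def enc(w):
--         head = str(ord(w[0]))
--         if len(w) == 1:
--             return head
--         if len(w) == 2:
--             return head + w[1]
--         return head + w[-1] + w[2:-1] + w[1]
--     return " ".join(enc(w) for w in text.split())
-- ===== Notes on version B (the rewrite author's own statement) =====
-- stated objective: faster
-- what changed: Replaces the per-character Python loop with its i==0/i==1/i==len-1 branch cascade by a closed-form slice concatenation per word: str(ord(w[0])) + w[-1] + w[2:-1] + w[1], with early returns for 1- and 2-letter words.
import Mathlib
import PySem

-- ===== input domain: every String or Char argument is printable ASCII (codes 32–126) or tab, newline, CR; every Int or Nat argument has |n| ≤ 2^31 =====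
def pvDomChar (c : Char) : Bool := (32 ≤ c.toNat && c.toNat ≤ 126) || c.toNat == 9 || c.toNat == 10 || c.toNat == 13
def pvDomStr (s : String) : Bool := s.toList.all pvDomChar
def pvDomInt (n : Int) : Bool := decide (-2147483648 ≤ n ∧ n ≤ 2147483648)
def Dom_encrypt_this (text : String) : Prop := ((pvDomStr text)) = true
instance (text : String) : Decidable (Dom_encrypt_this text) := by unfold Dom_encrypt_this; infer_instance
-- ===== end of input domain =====

-- B replaces A's per-character loop and branch cascade by a closed-form slice concatenation per word (measured faster in a timing run).

-- ===== PORT A =====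
-- one iteration of A's inner 'for letter in w' loop; state = (nw, i)
def encAStep (w : List Char) (st : List Char × Int) (letter : Char) : List Char × Int :=
  let nw :=
    if st.2 = 0 then st.1 ++ PySem.Int.toChars (letter.toNat : Int)
    else if st.2 = 1 then st.1 ++ [PySem.List.pyGetD w ((w.length : Int) - 1) letter]
    else if st.2 = (w.length : Int) - 1 then st.1 ++ [PySem.List.pyGetD w 1 letter]
    else st.1 ++ [PySem.List.pyGetD w st.2 letter]
  (nw, st.2 + 1)

-- A's body for one word (indices are always in range when a branch fires, so pyGetD's default is never used)
def encAWord (w : List Char) : List Char := (w.foldl (encAStep w) ([], 0)).1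

def encrypt_this (text : String) : String :=
  PySem.Str.join " "
    ((PySem.Str.split₀ text).foldl (fun r w => r ++ [String.ofList (encAWord w.toList)]) [])

-- ===== PORT B =====
-- B's enc(w): head = str(ord(w[0])); early returns for len 1 and 2; else head + w[-1] + w[2:-1] + w[1]
def encBWord (w : List Char) : List Char :=
  let head := PySem.Int.toChars ((PySem.List.pyGetD w 0 ' ').toNat : Int)
  if w.length = 1 then head
  else if w.length = 2 then head ++ [PySem.List.pyGetD w 1 ' ']
  else head ++ [PySem.List.pyGetD w (-1) ' '] ++ PySem.List.slice w (some 2) (some (-1))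
         ++ [PySem.List.pyGetD w 1 ' ']

def encrypt_this_alt (text : String) : String :=
  PySem.Str.join " " ((PySem.Str.split₀ text).map (fun w => String.ofList (encBWord w.toList)))

-- ===== PRECONDITION & SPEC =====
def Spec_encrypt_this (text : String) (out : String) : Prop := out = encrypt_this_alt text
instance (text : String) (out : String) : Decidable (Spec_encrypt_this text out) := by unfold Spec_encrypt_this; infer_instance

-- ===== CLAIM (what is proved, stated in full; the proofs are below) =====
def Claim_equal_encrypt_this : Prop := ∀ (text : String), Dom_encrypt_this text → Spec_encrypt_this text (encrypt_this text)

-- ===== LEMMAS AND PROOFS =====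

-- the words produced by split() are nonempty
theorem split₀_go_ne_nil (s cur : List Char) (acc : List (List Char))
    (hacc : ∀ v ∈ acc, v ≠ []) : ∀ v ∈ PySem.Chars.split₀.go s cur acc, v ≠ [] := by
  induction s generalizing cur acc with
  | nil =>
    intro v hv
    rw [PySem.Chars.split₀.go] at hv
    by_cases hc : cur.isEmpty
    · rw [if_pos hc, List.mem_reverse] at hv
      exact hacc v hv
    · rw [if_neg hc, List.mem_reverse] at hv
      rcases List.mem_cons.mp hv with hv | hv
      · subst hv
        exact fun h => hc (List.isEmpty_iff.mpr (List.reverse_eq_nil_iff.mp h))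
      · exact hacc v hv
  | cons c rest ih =>
    intro v hv
    rw [PySem.Chars.split₀.go] at hv
    by_cases hs : PySem.Chars.isspace c
    · rw [if_pos hs] at hv
      by_cases hc : cur.isEmpty
      · rw [if_pos hc] at hv
        exact ih [] acc hacc v hv
      · rw [if_neg hc] at hv
        refine ih [] (cur.reverse :: acc) ?_ v hv
        intro u hu
        rcases List.mem_cons.mp hu with hu | hu
        · subst hu
          exact fun h => hc (List.isEmpty_iff.mpr (List.reverse_eq_nil_iff.mp h))
        · exact hacc u hu
    · rw [if_neg hs] at hv
      exact ih (c :: cur) acc hacc v hv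

theorem mem_split₀_ne_nil (s : List Char) (v : List Char)
    (hv : v ∈ PySem.Chars.split₀ s) : v ≠ [] :=
  split₀_go_ne_nil s [] [] (by simp) v hv

-- what A's fold appends for the suffix of w starting at index i
def idxMap (w : List Char) (i : Int) : List Char → List Char
  | [] => []
  | letter :: t =>
      (if i = 0 then PySem.Int.toChars (letter.toNat : Int)
       else if i = 1 then [PySem.List.pyGetD w ((w.length : Int) - 1) letter]
       else if i = (w.length : Int) - 1 then [PySem.List.pyGetD w 1 letter]
       else [PySem.List.pyGetD w i letter]) ++ idxMap w (i + 1) t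

theorem foldA_eq_idxMap (w : List Char) (suf : List Char) :
    ∀ (nw : List Char) (i : Int),
      (suf.foldl (encAStep w) (nw, i)).1 = nw ++ idxMap w i suf := by
  induction suf with
  | nil => intro nw i; simp [idxMap]
  | cons letter t ih =>
    intro nw i
    simp only [List.foldl_cons, encAStep, idxMap]
    split_ifs <;> simp_all [List.append_assoc]

-- the high indices (2 ≤ i): A copies w[i] until the last position, where it emits w[1]
theorem idxMap_high (w : List Char) (suf : List Char) :
    ∀ (i : Nat), 2 ≤ i → w.drop i = suf → suf ≠ [] →
      idxMap w (i : Int) suf = suf.dropLast ++ [PySem.List.pyGetD w 1 ' '] := by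
  induction suf with
  | nil => intro i _ _ h; exact absurd rfl h
  | cons x s' ih =>
    intro i h2 hdrop _
    have hi : i < w.length := by
      by_contra h
      simp [List.drop_eq_nil_of_le (le_of_not_gt h)] at hdrop
    have h1w : 1 < w.length := by omega
    have hx : w[i]'hi = x := by
      have h0 : (w.drop i)[0]? = w[i]? := by
        rw [List.getElem?_drop]; norm_num
      rw [hdrop] at h0
      simp [List.getElem?_eq_getElem hi] at h0
      exact h0.symm
    have hs' : w.drop (i + 1) = s' := by
      have : (w.drop i).drop 1 = s' := by simp [hdrop]
      simpa [List.drop_drop, Nat.add_comm] using this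
    have hget1 : PySem.List.pyGetD w (1 : Int) x = PySem.List.pyGetD w (1 : Int) ' ' := by
      have e1 : PySem.List.pyGetD w (1 : Int) x = w[1]'h1w := by
        simpa using PySem.List.pyGetD_ofNat (xs := w) (n := 1) (d := x) h1w
      have e2 : PySem.List.pyGetD w (1 : Int) ' ' = w[1]'h1w := by
        simpa using PySem.List.pyGetD_ofNat (xs := w) (n := 1) (d := ' ') h1w
      rw [e1, e2]
    have hne0 : (i : Int) ≠ 0 := by omega
    have hne1 : (i : Int) ≠ 1 := by omega
    by_cases hlast : (i : Int) = (w.length : Int) - 1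
    · -- last position: s' = []
      have hlen : i + 1 = w.length := by omega
      have hs'nil : s' = [] := by
        have : w.drop (i + 1) = [] := by simp [hlen]
        rw [hs'] at this; exact this
      subst hs'nil
      rw [idxMap, if_neg hne0, if_neg hne1, if_pos hlast, idxMap]
      simp [hget1]
    · -- interior position: emit w[i] = x and recurse
      have hilt : i + 1 < w.length := by omega
      have hs'ne : s' ≠ [] := by
        intro h
        have := hs'
        rw [h] at this
        have := congrArg List.length this
        simp at this
        omega
      have hgi : PySem.List.pyGetD w (i : Int) x = x := by
        have := PySem.List.pyGetD_natCast (xs := w) (n := i) (d := x)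
        rw [this, List.getD_eq_getElem?_getD, List.getElem?_eq_getElem hi, hx]
        rfl
      rw [idxMap]
      rw [if_neg hne0, if_neg hne1, if_neg hlast]
      have hcast : (i : Int) + 1 = ((i + 1 : Nat) : Int) := by push_cast; ring
      rw [hgi, hcast, ih (i + 1) (by omega) hs' hs'ne]
      have hdl : (x :: s').dropLast = x :: s'.dropLast := by
        cases s' with
        | nil => exact absurd rfl hs'ne
        | cons a b => rfl
      simp [hdl]

-- per-word equality for a nonempty word
theorem word_eq (w : List Char) (hw : w ≠ []) : encAWord w = encBWord w := by
  obtain ⟨c, rest, rfl⟩ := List.exists_cons_of_ne_nil hw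
  have hA : encAWord (c :: rest) = idxMap (c :: rest) 0 (c :: rest) :=
    foldA_eq_idxMap (c :: rest) (c :: rest) [] 0
  cases rest with
  | nil =>
    rw [hA, idxMap, if_pos rfl, idxMap]
    norm_num [encBWord]
  | cons d t =>
    cases t with
    | nil =>
      rw [hA, idxMap, if_pos rfl, idxMap, idxMap]
      norm_num [encBWord]
      rw [PySem.List.pyGetD_ofNat', PySem.List.pyGetD_ofNat']
      rfl
    | cons e t' =>
      -- length ≥ 3
      set w := c :: d :: e :: t' with hwdef
      have hlen3 : 3 ≤ w.length := by simp [hwdef]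
      have hdrop2 : w.drop 2 = e :: t' := rfl
      have hhigh := idxMap_high w (e :: t') 2 (by omega) hdrop2 (by simp)
      norm_num at hhigh
      have h0 : idxMap w 0 w = PySem.Int.toChars (c.toNat : Int)
          ++ ([PySem.List.pyGetD w ((w.length : Int) - 1) d] ++ idxMap w 2 (e :: t')) := by
        rw [hwdef]
        rw [idxMap, if_pos rfl, idxMap]
        have : ((0 : Int) + 1) = 1 := by norm_num
        rw [this, if_neg (by norm_num), if_pos rfl]
        norm_num
      have hslice : PySem.List.slice w (some 2) (some (-1)) = (e :: t').dropLast := by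
        have hcl : PySem.List.clampIdx w.length (2 : Int) = 2 := by
          simp [PySem.List.clampIdx]; omega
        simp only [PySem.List.slice, PySem.List.clampIdx_neg_one, hcl]
        rw [hdrop2, List.dropLast_eq_take]
        congr 1
      have hlast : PySem.List.pyGetD w ((w.length : Int) - 1) d
          = PySem.List.pyGetD w (-1) ' ' := by
        have hwne : w ≠ [] := by simp [hwdef]
        have e1 : PySem.List.pyGetD w ((w.length : Int) - 1) d = w.getLast hwne := by
          have hl : w.length - 1 < w.length := by omega
          have hcast : (w.length : Int) - 1 = ((w.length - 1 : Nat) : Int) := by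
            push_cast [Nat.cast_sub (by omega : 1 ≤ w.length)]; ring
          rw [hcast, PySem.List.pyGetD_natCast, List.getD_eq_getElem?_getD,
            List.getElem?_eq_getElem hl]
          simp [List.getLast_eq_getElem]
        rw [e1, PySem.List.pyGetD_neg_one w ' ' hwne]
      have hget0 : PySem.List.pyGetD w (0 : Int) ' ' = c := by
        rw [hwdef, PySem.List.pyGetD_ofNat']; rfl
      have hget1 : PySem.List.pyGetD w (1 : Int) ' ' = d := by
        rw [hwdef, PySem.List.pyGetD_ofNat']; rfl
      have hB : encBWord w = PySem.Int.toChars (c.toNat : Int)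
          ++ [PySem.List.pyGetD w (-1) ' '] ++ (e :: t').dropLast
          ++ [PySem.List.pyGetD w (1 : Int) ' '] := by
        rw [encBWord]
        have hl1 : ¬ (w.length = 1) := by omega
        have hl2 : ¬ (w.length = 2) := by omega
        simp only [hl1, hl2, if_false, hget0, hslice]
      rw [hA, h0, hhigh, hB, hlast, hget1]
      have : PySem.List.pyGetD w (1 : Int) ' ' = d := hget1
      simp [List.append_assoc]

-- ===== VERDICT (by name: the statement is the Claim_ definition above) =====
theorem encrypt_this_spec : Claim_equal_encrypt_this := by
  intro text _
  unfold Spec_encrypt_this encrypt_this encrypt_this_alt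
  rw [PySem.List.foldl_append_singleton_eq_map]
  simp only [List.nil_append]
  congr 1
  apply List.map_congr_left
  intro w hw
  have hne : w.toList ≠ [] := by
    apply mem_split₀_ne_nil text.toList
    rw [← PySem.Str.split₀_map_toList]
    exact List.mem_map_of_mem hw
  rw [word_eq w.toList hne]
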